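-- pv_equiv track=rewrite | github.com/bugraid-ai/alert-ingestion-service | app.py | extract_service_info_from_path
-- ===== SOURCE A (Python) =====
-- from typing import List, Dict, Any, Optional
--
-- def extract_service_info_from_path(alert_key: str) -> Dict[str, str]:
--     """Extract service information from S3 path"""
--     path_parts = alert_key.split('/')
--     service_info = {}
--
--     # New path structure:
--     # s3://bucket/year=YYYY/month=MM/day=DD/hour=HH/data-type=alerts/severity=XX/business-unit=YY/service=ZZ/source=SS/
--
--     # Extract information from path parts
--     for part in path_parts:
--         if part.startswith("business-unit="):
--             service_info['business_unit'] = part.split('=', 1)[1]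
--         elif part.startswith("service="):
--             service_info['service'] = part.split('=', 1)[1]
--         elif part.startswith("source="):
--             service_info['source'] = part.split('=', 1)[1]
--         elif part.startswith("severity="):
--             service_info['severity'] = part.split('=', 1)[1]
--
--     return service_info
-- ===== SOURCE B (Python) =====
-- def extract_service_info_from_path(alert_key: str) -> dict:
--     """Extract service information from S3 path (parse-all then select)."""
--     fields = {}
--     for part in alert_key.split('/'):
--         if '=' in part:
--             key, value = part.split('=', 1)
--             fields[key] = value
--     mapping = {'business-unit': 'business_unit', 'service': 'service',
--                'source': 'source', 'severity': 'severity'}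
--     return {mapping[k]: v for k, v in fields.items() if k in mapping}
-- ===== Notes on version B (the rewrite author's own statement) =====
-- stated objective: alternative
-- what changed: Replaced the four-way startswith if/elif ladder with a two-phase structure: one generic pass parsing every key=value segment into a dict (last wins), then selection and renaming through a fixed source-key-to-output-key mapping.
import Mathlib
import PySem

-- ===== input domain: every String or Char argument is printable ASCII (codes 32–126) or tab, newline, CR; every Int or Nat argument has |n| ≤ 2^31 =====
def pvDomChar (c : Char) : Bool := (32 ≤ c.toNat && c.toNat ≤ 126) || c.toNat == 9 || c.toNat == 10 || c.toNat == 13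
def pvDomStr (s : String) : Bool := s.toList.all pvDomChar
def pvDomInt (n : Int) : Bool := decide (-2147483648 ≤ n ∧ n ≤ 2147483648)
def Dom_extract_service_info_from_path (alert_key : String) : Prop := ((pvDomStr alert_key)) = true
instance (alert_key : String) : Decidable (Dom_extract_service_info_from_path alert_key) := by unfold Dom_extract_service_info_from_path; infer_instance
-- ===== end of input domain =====

-- B replaces A's four-way startswith if/elif ladder by a generic parse-all key=value pass
-- into a dict followed by selection/renaming through a fixed key mapping (objective: alternative).

-- ===== PORT A =====
-- part.split('=', 1)[1]; exact whenever '=' occurs in part — the only situation A uses it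
-- (every branch guard guarantees an '=' in part, so the dummy "" default is unreachable there).
def pvVal1 (part : String) : String :=
  match PySem.Str.splitMax? part "=" 1 with
  | some (_ :: v :: _) => v
  | _ => ""

-- the body of A's `for part in path_parts` loop
def pvStepA (d : PySem.Dict String String) (part : String) : PySem.Dict String String :=
  if PySem.Str.startswith part "business-unit=" then d.insert "business_unit" (pvVal1 part)
  else if PySem.Str.startswith part "service=" then d.insert "service" (pvVal1 part)
  else if PySem.Str.startswith part "source=" then d.insert "source" (pvVal1 part)
  else if PySem.Str.startswith part "severity=" then d.insert "severity" (pvVal1 part)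
  else d

def extract_service_info_from_path (alert_key : String) : List (String × String) :=
  let path_parts := (PySem.Str.split? alert_key "/").getD []   -- "/" ≠ "", so split? is some
  (path_parts.foldl pvStepA PySem.Dict.empty).items

-- ===== PORT B =====
def pvFieldMap : PySem.Dict String String :=
  PySem.Dict.ofList [("business-unit", "business_unit"), ("service", "service"),
                     ("source", "source"), ("severity", "severity")]

-- the body of B's parse-all loop: if '=' in part: k, v = part.split('=', 1); fields[k] = v
def pvStepB (d : PySem.Dict String String) (part : String) : PySem.Dict String String :=
  if PySem.Str.isIn "=" part then
    match PySem.Str.splitMax? part "=" 1 with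
    | some (k :: v :: _) => d.insert k v
    | _ => d
  else d

-- {mapping[k]: v for k, v in fields.items() if k in mapping}
def pvSelect (kv : String × String) : Option (String × String) :=
  (pvFieldMap.get? kv.1).map fun nk => (nk, kv.2)

def extract_service_info_from_path_alt (alert_key : String) : List (String × String) :=
  let fields := ((PySem.Str.split? alert_key "/").getD []).foldl pvStepB PySem.Dict.empty
  fields.items.filterMap pvSelect

-- ===== PRECONDITION & SPEC =====
def Spec_extract_service_info_from_path (alert_key : String) (out : List (String × String)) : Prop := out = extract_service_info_from_path_alt alert_key
instance (alert_key : String) (out : List (String × String)) : Decidable (Spec_extract_service_info_from_path alert_key out) := by unfold Spec_extract_service_info_from_path; infer_instance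

-- ===== CLAIM (what is proved, stated in full; the proofs are below) =====
def Claim_equal_extract_service_info_from_path : Prop := ∀ (alert_key : String), Dom_extract_service_info_from_path alert_key → Spec_extract_service_info_from_path alert_key (extract_service_info_from_path alert_key)

-- ===== LEMMAS AND PROOFS =====

theorem pv_go_m0 (fuel : Nat) (l cur : List Char) (acc : List (List Char)) :
    PySem.Chars.splitOnMax.go ['='] fuel 0 l cur acc = ((cur.reverse ++ l) :: acc).reverse := by
  cases fuel with
  | zero => rfl
  | succ f => cases l with
    | nil => simp [PySem.Chars.splitOnMax.go]
    | cons c rest => simp [PySem.Chars.splitOnMax.go]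

-- `go` with maxsplit = 1 splits at the first '='
theorem pv_go_one (l : List Char) : ∀ (fuel : Nat) (cur : List Char) (acc : List (List Char)),
    l.length < fuel →
    PySem.Chars.splitOnMax.go ['='] fuel 1 l cur acc =
      if '=' ∈ l then
        ((l.dropWhile (· ≠ '=')).tail :: (cur.reverse ++ l.takeWhile (· ≠ '=')) :: acc).reverse
      else ((cur.reverse ++ l) :: acc).reverse := by
  induction l with
  | nil =>
    intro fuel cur acc hf
    cases fuel with
    | zero => omega
    | succ f => simp [PySem.Chars.splitOnMax.go]
  | cons c rest ih =>
    intro fuel cur acc hf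
    cases fuel with
    | zero => simp at hf
    | succ f =>
      by_cases hc : c = '='
      · subst hc
        simp only [PySem.Chars.splitOnMax.go, List.isPrefixOf, List.mem_cons]
        simp [pv_go_m0, List.takeWhile, List.dropWhile]
      · have hc' : ('=' == c) = false := by simp [Ne.symm hc]
        have hstep : PySem.Chars.splitOnMax.go ['='] (f + 1) 1 (c :: rest) cur acc =
            PySem.Chars.splitOnMax.go ['='] f 1 rest (c :: cur) acc := by
          simp [PySem.Chars.splitOnMax.go, List.isPrefixOf, hc']
        rw [hstep, ih f (c :: cur) acc (by simpa using hf)]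
        by_cases hm : '=' ∈ rest
        · simp [hm, hc, List.takeWhile, List.dropWhile, Ne.symm hc]
        · simp [hm, Ne.symm hc]

-- Python's part.split('=', 1)
theorem pv_splitMax_char (part : String) :
    PySem.Str.splitMax? part "=" 1 =
      some (if '=' ∈ part.toList then
          [String.ofList (part.toList.takeWhile (· ≠ '=')),
           String.ofList ((part.toList.dropWhile (· ≠ '=')).tail)]
        else [part]) := by
  have h : PySem.Chars.splitMax? part.toList ['='] 1 =
      PySem.Chars.splitOnMax.go ['='] (part.toList.length + 1) 1 part.toList [] [] := by
    simp [PySem.Chars.splitMax?, PySem.Chars.splitOnMax]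
  rw [PySem.Str.splitMax?]
  have hs : ("=" : String).toList = ['='] := rfl
  rw [hs, h, pv_go_one part.toList (part.toList.length + 1) [] [] (by omega)]
  by_cases hm : '=' ∈ part.toList <;> simp [hm]

-- Python's '=' in part
theorem pv_isIn_char (part : String) :
    PySem.Str.isIn "=" part = decide ('=' ∈ part.toList) := by
  rw [PySem.Str.isIn_eq]
  have hs : ("=" : String).toList = ['='] := rfl
  rw [hs]
  by_cases hm : '=' ∈ part.toList
  · simp [hm, (PySem.Chars.isIn_iff_infix ['='] part.toList).mpr
      ((List.singleton_infix_iff '=' part.toList).mpr hm)]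
  · simp only [hm, decide_false]
    rcases hb : PySem.Chars.isIn ['='] part.toList with _ | _
    · rfl
    · exact absurd ((List.singleton_infix_iff '=' part.toList).mp
        ((PySem.Chars.isIn_iff_infix ['='] part.toList).mp hb)) hm

theorem pv_takeWhile_key (a t : List Char) (ha : '=' ∉ a) :
    (a ++ '=' :: t).takeWhile (· ≠ '=') = a := by
  induction a with
  | nil => simp
  | cons c a' ih =>
    have hc : c ≠ '=' := fun h => ha (h ▸ List.mem_cons_self)
    have ih' := ih (fun h => ha (List.mem_cons_of_mem _ h))
    rw [List.cons_append, List.takeWhile_cons]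
    simp only [hc, ne_eq]
    simpa using ih'

-- Python's part.startswith(key + "="), for a key not containing '='
theorem pv_startswith_char (part pre key : String) (hks : pre.toList = key.toList ++ ['='])
    (hk : '=' ∉ key.toList) :
    PySem.Str.startswith part pre = true ↔
      ('=' ∈ part.toList ∧ part.toList.takeWhile (· ≠ '=') = key.toList) := by
  rw [PySem.Str.startswith_eq, PySem.Chars.startswith_iff, hks]
  constructor
  · rintro ⟨t, ht⟩
    rw [List.append_assoc, List.singleton_append] at ht
    refine ⟨?_, ?_⟩
    · rw [← ht]; simp
    · rw [← ht]; exact pv_takeWhile_key _ _ hk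
  · rintro ⟨hm, htw⟩
    have hd : part.toList.dropWhile (· ≠ '=') ≠ [] := by
      intro h0
      have := List.takeWhile_append_dropWhile (p := (· ≠ '=')) (l := part.toList)
      rw [h0, List.append_nil, htw] at this
      exact hk (this ▸ hm)
    rcases hdw : part.toList.dropWhile (· ≠ '=') with _ | ⟨x, xs⟩
    · exact absurd hdw hd
    · have hx : x = '=' := by
        have hh := List.head_dropWhile_not (fun c => decide (c ≠ '=')) hd
        simp only [hdw, List.head_cons] at hh
        simpa using hh
      refine ⟨xs, ?_⟩
      rw [← List.takeWhile_append_dropWhile (p := (· ≠ '=')) (l := part.toList), htw, hdw, hx]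
      simp

-- the literal lookup table
theorem pv_get?_fieldMap (k : String) :
    pvFieldMap.get? k =
      if k = "business-unit" then some "business_unit"
      else if k = "service" then some "service"
      else if k = "source" then some "source"
      else if k = "severity" then some "severity"
      else none := by
  have hmk : pvFieldMap = PySem.Dict.mk [("business-unit", "business_unit"), ("service", "service"),
      ("source", "source"), ("severity", "severity")] := by decide
  by_cases h1 : k = "business-unit"
  · subst h1; decide
  by_cases h2 : k = "service"
  · subst h2; decide
  by_cases h3 : k = "source"
  · subst h3; decide
  by_cases h4 : k = "severity"
  · subst h4; decide
  have b1 : ("business-unit" == k) = false := by simp [Ne.symm h1]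
  have b2 : ("service" == k) = false := by simp [Ne.symm h2]
  have b3 : ("source" == k) = false := by simp [Ne.symm h3]
  have b4 : ("severity" == k) = false := by simp [Ne.symm h4]
  rw [hmk]
  simp [PySem.Dict.get?, List.find?, b1, b2, b3, b4, h1, h2, h3, h4]

theorem pv_ren_inj (k k' nk : String) (h : pvFieldMap.get? k = some nk)
    (h' : pvFieldMap.get? k' = some nk) : k = k' := by
  rw [pv_get?_fieldMap] at h h'
  split_ifs at h h' <;>
    first
      | exact Option.noConfusion h
      | exact Option.noConfusion h'
      | exact absurd (h.trans h'.symm) (by decide)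
      | (injection h with h; injection h' with h'; subst_vars; rfl)

theorem pv_sel_map_replace_none (l : List (String × String)) (k v : String)
    (h : pvFieldMap.get? k = none) :
    (l.map (fun p => if p.1 == k then (k, v) else p)).filterMap pvSelect =
      l.filterMap pvSelect := by
  induction l with
  | nil => rfl
  | cons p rest ih =>
    rw [List.map_cons]
    by_cases hp : p.1 = k
    · have h1 : (if p.1 == k then (k, v) else p) = (k, v) := by simp [hp]
      have h2 : pvSelect (k, v) = none := by simp [pvSelect, h]
      have h3 : pvSelect p = none := by simp [pvSelect, hp, h]
      rw [h1, List.filterMap_cons_none h2, List.filterMap_cons_none h3, ih]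
    · have h1 : (if p.1 == k then (k, v) else p) = p := by simp [hp]
      rw [h1]
      rcases hsel : pvSelect p with _ | q
      · rw [List.filterMap_cons_none hsel, List.filterMap_cons_none hsel, ih]
      · rw [List.filterMap_cons_some hsel, List.filterMap_cons_some hsel, ih]

theorem pv_sel_insert_none (d : PySem.Dict String String) (k v : String)
    (h : pvFieldMap.get? k = none) :
    ((d.insert k v).items).filterMap pvSelect = d.items.filterMap pvSelect := by
  rcases hdk : d.contains k with _ | _
  · rw [PySem.Dict.items_insert_of_not_contains d v hdk, List.filterMap_append]
    simp [pvSelect, h]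
  · rw [PySem.Dict.items_insert_of_contains d v hdk]
    exact pv_sel_map_replace_none d.items k v h

theorem pv_contains_sel (l : List (String × String)) (k nk : String)
    (h : pvFieldMap.get? k = some nk) :
    (l.filterMap pvSelect).any (fun p => p.1 == nk) = l.any (fun p => p.1 == k) := by
  induction l with
  | nil => rfl
  | cons p rest ih =>
    rcases hp : pvFieldMap.get? p.1 with _ | m
    · have hpk : (p.1 == k) = false := by
        refine beq_eq_false_iff_ne.mpr fun he => ?_
        rw [he, h] at hp; simp at hp
      have hsel : pvSelect p = none := by simp [pvSelect, hp]
      rw [List.filterMap_cons_none hsel, List.any_cons, hpk, Bool.false_or]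
      exact ih
    · have hsel : pvSelect p = some (m, p.2) := by simp [pvSelect, hp]
      have hmn : (m == nk) = (p.1 == k) := by
        by_cases he : m = nk
        · subst he
          simp [pv_ren_inj p.1 k m hp h]
        · have hpk : p.1 ≠ k := fun hq => by rw [hq, h] at hp; simp at hp; exact he hp.symm
          simp [he, hpk]
      rw [List.filterMap_cons_some hsel, List.any_cons, List.any_cons, hmn, ih]

theorem pv_sel_map_replace (l : List (String × String)) (k nk v : String)
    (h : pvFieldMap.get? k = some nk) :
    (l.map (fun p => if p.1 == k then (k, v) else p)).filterMap pvSelect =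
      (l.filterMap pvSelect).map (fun p => if p.1 == nk then (nk, v) else p) := by
  induction l with
  | nil => rfl
  | cons p rest ih =>
    rw [List.map_cons]
    by_cases hp : p.1 = k
    · have h1 : (if p.1 == k then (k, v) else p) = (k, v) := by simp [hp]
      have h2 : pvSelect (k, v) = some (nk, v) := by simp [pvSelect, h]
      have h3 : pvSelect p = some (nk, p.2) := by simp [pvSelect, hp, h]
      rw [h1, List.filterMap_cons_some h2, List.filterMap_cons_some h3, List.map_cons, ih]
      simp
    · have h1 : (if p.1 == k then (k, v) else p) = p := by simp [hp]
      rw [h1]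
      rcases hq : pvFieldMap.get? p.1 with _ | m
      · have h2 : pvSelect p = none := by simp [pvSelect, hq]
        rw [List.filterMap_cons_none h2, List.filterMap_cons_none h2, ih]
      · have h2 : pvSelect p = some (m, p.2) := by simp [pvSelect, hq]
        have hmn : m ≠ nk := fun he => hp (pv_ren_inj p.1 k nk (he ▸ hq) h)
        rw [List.filterMap_cons_some h2, List.filterMap_cons_some h2, List.map_cons, ih]
        simp [hmn]

theorem pv_sel_insert_some (d : PySem.Dict String String) (k nk v : String)
    (h : pvFieldMap.get? k = some nk) :
    ((d.insert k v).items).filterMap pvSelect =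
      ((PySem.Dict.mk (d.items.filterMap pvSelect)).insert nk v).items := by
  have hc : (PySem.Dict.mk (d.items.filterMap pvSelect)).contains nk = d.contains k := by
    simp only [PySem.Dict.contains]
    exact pv_contains_sel d.items k nk h
  rcases hdk : d.contains k with _ | _
  · rw [PySem.Dict.items_insert_of_not_contains d v hdk,
      PySem.Dict.items_insert_of_not_contains _ v (by rw [hc, hdk]), List.filterMap_append]
    simp [pvSelect, h]
  · rw [PySem.Dict.items_insert_of_contains d v hdk,
      PySem.Dict.items_insert_of_contains _ v (by rw [hc, hdk])]
    exact pv_sel_map_replace d.items k nk v h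

-- one loop iteration preserves "A's dict = selected/renamed view of B's dict"
theorem pv_step (part : String) (dA dB : PySem.Dict String String)
    (hI : dA.items = dB.items.filterMap pvSelect) :
    (pvStepA dA part).items = (pvStepB dB part).items.filterMap pvSelect := by
  by_cases hm : '=' ∈ part.toList
  · -- B inserts (k, v); A's ladder fires iff k is one of the four keys
    set tw := part.toList.takeWhile (· ≠ '=') with htw
    set k := String.ofList tw with hkdef
    set v := String.ofList ((part.toList.dropWhile (· ≠ '=')).tail) with hvdef
    have hsplit := pv_splitMax_char part
    rw [if_pos hm] at hsplit
    have hB : pvStepB dB part = dB.insert k v := by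
      rw [pvStepB, pv_isIn_char, hsplit, if_pos (decide_eq_true hm)]
    have hval : pvVal1 part = v := by
      rw [pvVal1, hsplit]
    have hkt : k.toList = tw := String.toList_ofList
    have hkey : ∀ key : String, (k = key ↔ tw = key.toList) := by
      intro key
      constructor
      · intro he; rw [← hkt, he]
      · intro he; rw [hkdef, he, String.ofList_toList]
    have hswt : ∀ pre key : String, pre.toList = key.toList ++ ['='] → '=' ∉ key.toList →
        tw = key.toList → PySem.Str.startswith part pre = true := fun pre key hks hk hq =>
      (pv_startswith_char part pre key hks hk).mpr ⟨hm, hq⟩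
    have hswf : ∀ pre key : String, pre.toList = key.toList ++ ['='] → '=' ∉ key.toList →
        tw ≠ key.toList → PySem.Str.startswith part pre = false := by
      intro pre key hks hk hq
      rcases hb : PySem.Str.startswith part pre with _ | _
      · rfl
      · exact absurd ((pv_startswith_char part pre key hks hk).mp hb).2 hq
    have hAeq : ∀ nk : String, pvFieldMap.get? k = some nk →
        (dA.insert nk v).items = ((dB.insert k v).items).filterMap pvSelect := by
      intro nk hnk
      rw [pv_sel_insert_some dB k nk v hnk, ← hI]
    rw [hB]
    by_cases c1 : tw = ("business-unit" : String).toList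
    · rw [pvStepA, hswt "business-unit=" "business-unit" rfl (by decide) c1, if_pos rfl, hval]
      exact hAeq "business_unit" (by rw [pv_get?_fieldMap, if_pos ((hkey "business-unit").mpr c1)])
    · by_cases c2 : tw = ("service" : String).toList
      · rw [pvStepA, hswf "business-unit=" "business-unit" rfl (by decide) c1,
          hswt "service=" "service" rfl (by decide) c2, if_neg Bool.false_ne_true,
          if_pos rfl, hval]
        refine hAeq "service" ?_
        have hk2 : k = "service" := (hkey "service").mpr c2
        rw [pv_get?_fieldMap, if_neg (by rw [hk2]; decide), if_pos hk2]
      · by_cases c3 : tw = ("source" : String).toList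
        · rw [pvStepA, hswf "business-unit=" "business-unit" rfl (by decide) c1,
            hswf "service=" "service" rfl (by decide) c2,
            hswt "source=" "source" rfl (by decide) c3, if_neg Bool.false_ne_true,
            if_neg Bool.false_ne_true, if_pos rfl, hval]
          refine hAeq "source" ?_
          have hk3 : k = "source" := (hkey "source").mpr c3
          rw [pv_get?_fieldMap, if_neg (by rw [hk3]; decide), if_neg (by rw [hk3]; decide),
            if_pos hk3]
        · by_cases c4 : tw = ("severity" : String).toList
          · rw [pvStepA, hswf "business-unit=" "business-unit" rfl (by decide) c1,
              hswf "service=" "service" rfl (by decide) c2,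
              hswf "source=" "source" rfl (by decide) c3,
              hswt "severity=" "severity" rfl (by decide) c4, if_neg Bool.false_ne_true,
              if_neg Bool.false_ne_true, if_neg Bool.false_ne_true, if_pos rfl, hval]
            refine hAeq "severity" ?_
            have hk4 : k = "severity" := (hkey "severity").mpr c4
            rw [pv_get?_fieldMap, if_neg (by rw [hk4]; decide), if_neg (by rw [hk4]; decide),
              if_neg (by rw [hk4]; decide), if_pos hk4]
          · -- key parsed but not one of the four: A skips, the selection drops it
            have hnone : pvFieldMap.get? k = none := by
              rw [pv_get?_fieldMap, if_neg (fun he => c1 ((hkey "business-unit").mp he)),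
                if_neg (fun he => c2 ((hkey "service").mp he)),
                if_neg (fun he => c3 ((hkey "source").mp he)),
                if_neg (fun he => c4 ((hkey "severity").mp he))]
            rw [pvStepA, hswf "business-unit=" "business-unit" rfl (by decide) c1,
              hswf "service=" "service" rfl (by decide) c2,
              hswf "source=" "source" rfl (by decide) c3,
              hswf "severity=" "severity" rfl (by decide) c4, if_neg Bool.false_ne_true,
              if_neg Bool.false_ne_true, if_neg Bool.false_ne_true, if_neg Bool.false_ne_true,
              hI, pv_sel_insert_none dB k v hnone]
  · -- no '=': both loops skip the part
    have hB : pvStepB dB part = dB := by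
      rw [pvStepB, pv_isIn_char]; simp [hm]
    have hswf : ∀ pre key : String, pre.toList = key.toList ++ ['='] → '=' ∉ key.toList →
        PySem.Str.startswith part pre = false := by
      intro pre key hks hk
      rcases hb : PySem.Str.startswith part pre with _ | _
      · rfl
      · exact absurd ((pv_startswith_char part pre key hks hk).mp hb).1 hm
    rw [hB, pvStepA,
      hswf "business-unit=" "business-unit" rfl (by decide),
      hswf "service=" "service" rfl (by decide),
      hswf "source=" "source" rfl (by decide),
      hswf "severity=" "severity" rfl (by decide), if_neg Bool.false_ne_true,
      if_neg Bool.false_ne_true, if_neg Bool.false_ne_true, if_neg Bool.false_ne_true, hI]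

theorem pv_fold_inv (parts : List String) : ∀ (dA dB : PySem.Dict String String),
    dA.items = dB.items.filterMap pvSelect →
    (parts.foldl pvStepA dA).items = (parts.foldl pvStepB dB).items.filterMap pvSelect := by
  induction parts with
  | nil => intro dA dB h; simpa using h
  | cons p rest ih =>
    intro dA dB h
    exact ih (pvStepA dA p) (pvStepB dB p) (pv_step p dA dB h)

-- ===== VERDICT (by name: the statement is the Claim_ definition above) =====
theorem extract_service_info_from_path_spec : Claim_equal_extract_service_info_from_path := by
  intro alert_key _
  show _ = _
  rw [extract_service_info_from_path, extract_service_info_from_path_alt]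
  exact pv_fold_inv ((PySem.Str.split? alert_key "/").getD []) PySem.Dict.empty PySem.Dict.empty rfl
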